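-- pv_equiv track=rewrite | github.com/Mekost/ASD_offline_codes | Algorytmy/bellman-ford.py | createGDirected
-- ===== SOURCE A (Python) =====
-- def createGDirected(edges):
--     n = 0
--     for edge in edges:
--         n = max( n, edge[0], edge[1] )
--     #
--     G = [ [] for _ in range(n+1) ]
--     for edge in edges:
--         a, b, weight = edge[0], edge[1], edge[2]
--         G[a].append( (b, weight) )
--     #
--     return G
-- ===== SOURCE B (Python) =====
-- def createGDirected(edges):
--     # Per-node gathering: the adjacency row of node i is simply the list of
--     # (destination, weight) of the edges whose source is i, in edge order.
--     n = max((x for a, b, _ in edges for x in (a, b)), default=0)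
--     return [[(b, w) for a, b, w in edges if a == i] for i in range(n + 1)]
-- ===== Notes on version B (the rewrite author's own statement) =====
-- stated objective: simpler
-- what changed: Replaces A's bucket-population strategy (pre-build an indexed list of lists, then one pass appending each edge into its source's bucket) with a per-node gathering: for each node i in range a fresh scan collects the edges whose source is i, so no mutable indexed structure exists at all.
-- outside the precondition, e.g. on createGDirected([(-1, 0, 5)]): A returns [[(0, 5)]], B returns [[]]; on createGDirected([(-3, 0, 1)]): A raises IndexError, B returns [[]]
import Mathlib
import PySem

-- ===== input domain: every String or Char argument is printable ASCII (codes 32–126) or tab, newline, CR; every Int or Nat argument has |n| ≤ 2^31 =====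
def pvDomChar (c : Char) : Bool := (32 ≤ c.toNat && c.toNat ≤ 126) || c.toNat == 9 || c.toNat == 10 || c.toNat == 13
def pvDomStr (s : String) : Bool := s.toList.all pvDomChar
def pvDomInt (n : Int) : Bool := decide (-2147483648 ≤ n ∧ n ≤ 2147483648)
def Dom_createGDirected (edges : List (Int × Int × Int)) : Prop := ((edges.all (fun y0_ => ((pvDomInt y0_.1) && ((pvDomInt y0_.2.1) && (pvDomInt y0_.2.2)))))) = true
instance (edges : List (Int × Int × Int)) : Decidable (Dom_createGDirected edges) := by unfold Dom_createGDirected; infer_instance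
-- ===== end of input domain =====

-- B drops A's mutable bucket structure: instead of pre-building an indexed list of
-- lists and appending each edge into its source's bucket, B gathers, for each node
-- i of range(n+1), the edges with source i by a fresh scan (a nested comprehension).

-- ===== PORT A =====
-- G[a].append(...): Python indexing (a negative index counts from the end); where
-- Python raises IndexError (pyIdx? = none, excluded by Pre_) the port leaves G unchanged.
def pvAStep (G : List (List (Int × Int))) (e : Int × Int × Int) : List (List (Int × Int)) :=
  match PySem.List.pyIdx? G.length e.1 with
  | some i => G.modify i (fun l => l ++ [(e.2.1, e.2.2)])
  | none => G

def createGDirected (edges : List (Int × Int × Int)) : List (List (Int × Int)) :=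
  let n : Int := edges.foldl (fun n e => max (max n e.1) e.2.1) 0
  let G : List (List (Int × Int)) := (PySem.List.pyRange 0 (n + 1) 1).map (fun _ => [])
  edges.foldl pvAStep G

-- ===== PORT B =====
-- max((x for a,b,_ in edges for x in (a,b)), default=0) → max? over the flattened
-- endpoint list with default 0; the nested comprehension → map of filter-map.
def createGDirected_alt (edges : List (Int × Int × Int)) : List (List (Int × Int)) :=
  let n : Int := (PySem.List.max? (edges.flatMap (fun e => [e.1, e.2.1])) (fun x => x)).getD 0
  (PySem.List.pyRange 0 (n + 1) 1).map
    (fun i => (edges.filter (fun e => e.1 == i)).map (fun e => (e.2.1, e.2.2)))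

-- ===== PRECONDITION & SPEC =====
-- Pre_ restricts to the function's natural domain: node ids are nonnegative list
-- indices; an edge with a negative source has no slot in the adjacency list, so
-- there A either raises IndexError or (by Python's negative indexing) returns a
-- list that is not the adjacency list of any graph, and B has nothing to match.
def Pre_createGDirected (edges : List (Int × Int × Int)) : Prop :=
  ∀ e ∈ edges, 0 ≤ e.1

instance (edges : List (Int × Int × Int)) : Decidable (Pre_createGDirected edges) := by
  unfold Pre_createGDirected; infer_instance

def pvWitness_createGDirected : (List (Int × Int × Int)) := [(0, 2, 5), (2, 0, -1), (0, 1, 3)]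

def Spec_createGDirected (edges : List (Int × Int × Int)) (out : List (List (Int × Int))) : Prop := out = createGDirected_alt edges
instance (edges : List (Int × Int × Int)) (out : List (List (Int × Int))) : Decidable (Spec_createGDirected edges out) := by unfold Spec_createGDirected; infer_instance

-- ===== CLAIM (what is proved, stated in full; the proofs are below) =====
def Claim_equal_createGDirected : Prop := ∀ (edges : List (Int × Int × Int)), Dom_createGDirected edges → Pre_createGDirected edges → Spec_createGDirected edges (createGDirected edges)

-- ===== LEMMAS AND PROOFS =====

-- the per-index content both programs produce
def pvOut (edges : List (Int × Int × Int)) (i : Int) : List (Int × Int) :=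
  (edges.filter (fun e => e.1 == i)).map (fun e => (e.2.1, e.2.2))

-- the max fold dominates its seed
theorem pvN_ge_seed (edges : List (Int × Int × Int)) (s : Int) :
    s ≤ edges.foldl (fun n e => max (max n e.1) e.2.1) s := by
  induction edges generalizing s with
  | nil => simp
  | cons e es ih => exact le_trans (by simp) (ih _)

-- every source node is bounded by the max fold
theorem pvN_ge_src (edges : List (Int × Int × Int)) (s : Int) (e : Int × Int × Int) :
    e ∈ edges → e.1 ≤ edges.foldl (fun n x => max (max n x.1) x.2.1) s := by
  induction edges generalizing s with
  | nil => intro h; cases h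
  | cons a as ih =>
    intro h
    rcases List.mem_cons.mp h with h | h
    · subst h; exact le_trans (by simp) (pvN_ge_seed as _)
    · exact ih _ h

-- A's population loop, characterized per index
theorem pvA_loop (edges : List (Int × Int × Int)) (G : List (List (Int × Int)))
    (h : ∀ e ∈ edges, 0 ≤ e.1 ∧ e.1 < (G.length : Int)) (i : Nat) :
    (edges.foldl pvAStep G)[i]? = (G[i]?).map (fun l => l ++ pvOut edges (i : Int)) := by
  induction edges generalizing G with
  | nil => simp [pvOut]
  | cons e es ih =>
    obtain ⟨h0, h1⟩ := h e (by simp)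
    have hidx : PySem.List.pyIdx? G.length e.1 = some e.1.toNat := by
      simp only [PySem.List.pyIdx?, if_pos h0, if_pos h1]
    have hstep : pvAStep G e = G.modify e.1.toNat (fun l => l ++ [(e.2.1, e.2.2)]) := by
      simp [pvAStep, hidx]
    have hlen : (pvAStep G e).length = G.length := by simp [hstep]
    rw [List.foldl_cons, ih (pvAStep G e) (fun x hx => by
      have := h x (List.mem_cons_of_mem _ hx)
      simpa [hlen] using this)]
    rw [hstep]
    by_cases hcase : e.1.toNat = i
    · have : e.1 = (i : Int) := by omega
      simp [pvOut, this, Option.map_map]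
      cases G[i]? <;> simp [Function.comp]
    · have : ¬ (e.1 == (i : Int)) := by simp; omega
      simp [pvOut, hcase, this]

-- folding max over the flattened endpoint list is A's max fold
theorem pvMax_flat (edges : List (Int × Int × Int)) (s : Int) :
    (edges.flatMap (fun e => [e.1, e.2.1])).foldl max s
      = edges.foldl (fun n e => max (max n e.1) e.2.1) s := by
  induction edges generalizing s with
  | nil => rfl
  | cons e es ih => simp only [List.flatMap_cons, List.foldl_append, List.foldl_cons,
      List.foldl_nil, ih]

-- the seed of a max fold commutes out
theorem pvFoldl_max_out (l : List Int) (a b : Int) :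
    l.foldl max (max a b) = max a (l.foldl max b) := by
  induction l generalizing b with
  | nil => rfl
  | cons c t ih => simpa [max_assoc] using ih (max b c)

-- B's n equals A's n when every source is nonnegative
theorem pvN_eq (edges : List (Int × Int × Int)) (hpre : ∀ e ∈ edges, 0 ≤ e.1) :
    (PySem.List.max? (edges.flatMap (fun e => [e.1, e.2.1])) (fun x => x)).getD 0
      = edges.foldl (fun n e => max (max n e.1) e.2.1) 0 := by
  cases edges with
  | nil => rfl
  | cons e es =>
    have h0 : 0 ≤ e.1 := hpre e (by simp)
    rw [show (((e :: es).flatMap (fun e => [e.1, e.2.1]))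
          = e.1 :: e.2.1 :: es.flatMap (fun e => [e.1, e.2.1])) from by simp,
        PySem.List.max?_id_cons, Option.getD_some, ← pvMax_flat]
    simp only [List.flatMap_cons, List.cons_append, List.nil_append, List.foldl_cons]
    rw [show max (max 0 e.1) e.2.1 = max 0 (max e.1 e.2.1) by omega,
        pvFoldl_max_out (es.flatMap (fun e => [e.1, e.2.1])) 0 (max e.1 e.2.1)]
    have hge : e.1 ≤ (es.flatMap (fun e => [e.1, e.2.1])).foldl max (max e.1 e.2.1) := by
      have := pvFoldl_max_out (es.flatMap (fun e => [e.1, e.2.1])) e.1 e.2.1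
      calc e.1 ≤ max e.1 ((es.flatMap (fun e => [e.1, e.2.1])).foldl max e.2.1) := le_max_left _ _
        _ = _ := this.symm
    omega

-- ===== VERDICT (by name: the statement is the Claim_ definition above) =====
theorem createGDirected_spec : Claim_equal_createGDirected := by
  intro edges _ hpre
  unfold Spec_createGDirected createGDirected createGDirected_alt
  rw [pvN_eq edges hpre]
  set n : Int := edges.foldl (fun n e => max (max n e.1) e.2.1) 0 with hn
  have hRlen : (PySem.List.pyRange 0 (n + 1) 1).length = (n + 1).toNat := by
    simp [PySem.List.length_pyRange_one]
  apply List.ext_getElem?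
  intro i
  rw [pvA_loop edges _ (fun e he => ⟨hpre e he, by
      simp only [List.length_map, hRlen]
      have := pvN_ge_src edges 0 e he; omega⟩) i]
  by_cases hi : i < (n + 1).toNat
  · have hlt : i < (PySem.List.pyRange 0 (n + 1) 1).length := by rw [hRlen]; exact hi
    rw [List.getElem?_map, List.getElem?_map, List.getElem?_eq_getElem hlt]
    simp only [Option.map_some, PySem.List.getElem_pyRange_one, zero_add, pvOut,
      List.nil_append]
  · have hge : (PySem.List.pyRange 0 (n + 1) 1).length ≤ i := by rw [hRlen]; omega
    rw [List.getElem?_map, List.getElem?_map, List.getElem?_eq_none hge]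
    rfl
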